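-- pv_equiv track=rewrite | github.com/Nikhilesh-B/CompetitiveProgrammingPractice | codeforces/div3/957/d.py | solve
-- ===== SOURCE A (Python) =====
-- def solve(n, m, k, a):
--     goal = n
--
--     queue = [(-1, 0)]
--     explored = set()
--
--     while queue:
--         current = queue.pop(0)
--         c_pos = current[0]
--         c_swim = current[1]
--         if c_pos == goal:
--             return "YES"
--         if current not in explored:
--             explored.add(current)
--
--             if c_pos == -1 or a[c_pos] == "L":
--                 for j in range(1, m+1):
--                     if c_pos+j == n and (c_pos+j, c_swim) not in explored:
--                         queue.append((c_pos+j, c_swim))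
--                         break
--                     elif a[c_pos+j] != 'C' and (c_pos+j, c_swim) not in explored:
--                         queue.append((c_pos+j, c_swim))
--
--             if c_swim < k:
--                 if c_pos+1 == n and (c_pos+1, c_swim+1) not in explored:
--                     queue.append((c_pos+1, c_swim+1))
--                 elif a[c_pos+1] != 'C' and (c_pos+1, c_swim+1) not in explored:
--                     queue.append((c_pos+1, c_swim+1))
--
--     return "NO"
-- ===== SOURCE B (Python) =====
-- def solve(n, m, k, a):
--     # Left-to-right DP: best[q] = minimal number of swum meters over all ways
--     # to reach position q (None = unreachable); positions only increase, so a
--     # single forward sweep replaces the BFS.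
--     best = [None] * (n + 1)
--     for p in range(-1, n):
--         if p == -1:
--             s = 0
--         elif best[p] is None:
--             continue
--         else:
--             s = best[p]
--         if p == -1 or a[p] == 'L':
--             for j in range(1, m + 1):
--                 q = p + j
--                 if q > n:
--                     break
--                 if q == n or a[q] != 'C':
--                     if best[q] is None or s < best[q]:
--                         best[q] = s
--                 if q == n:
--                     break
--         if s < k:
--             q = p + 1
--             if q == n or a[q] != 'C':
--                 if best[q] is None or s + 1 < best[q]:
--                     best[q] = s + 1
--     return "YES" if best[n] is not None else "NO"
-- ===== Notes on version B (the rewrite author's own statement) =====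
-- stated objective: faster
-- what changed: Replaces the BFS over (position, swims) states with list.pop(0) and an explored set by a single left-to-right DP sweep keeping, per position, only the minimal number of swum meters needed to reach it.
-- outside the precondition, e.g. on solve(3, 2, 0, 'WW'): A returns 'NO', B returns 'NO'; on solve(-1, 0, 0, ''): A returns 'YES', B raises IndexError; on solve(3, 2, 0, 'LW'): A raises IndexError, B raises IndexError
import Mathlib
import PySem

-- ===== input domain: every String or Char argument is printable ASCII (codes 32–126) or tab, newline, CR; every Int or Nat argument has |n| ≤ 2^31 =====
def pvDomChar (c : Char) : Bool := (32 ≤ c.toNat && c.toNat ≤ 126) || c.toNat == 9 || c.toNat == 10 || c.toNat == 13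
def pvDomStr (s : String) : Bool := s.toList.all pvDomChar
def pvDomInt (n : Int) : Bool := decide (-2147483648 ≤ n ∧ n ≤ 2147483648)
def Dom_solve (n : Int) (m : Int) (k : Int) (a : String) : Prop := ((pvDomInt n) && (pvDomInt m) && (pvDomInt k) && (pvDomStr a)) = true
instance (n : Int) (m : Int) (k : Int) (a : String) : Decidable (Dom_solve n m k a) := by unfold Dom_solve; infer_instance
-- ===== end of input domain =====

-- B replaces A's BFS over (position, swims) states by one left-to-right sweep keeping the
-- minimal swim count per position (objective: faster).

-- ===== PORT A =====
-- 'for j in range(1, m+1)' with break, appending jump targets to the queue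
def jloopA (n m : Int) (a : String) (p s : Int) (ex : PySem.Set (Int × Int)) (j : Int) (q : List (Int × Int)) : List (Int × Int) :=
  if _h : j < m + 1 then
    if p + j = n ∧ (p + j, s) ∉ ex then q ++ [(p + j, s)]    -- append; break
    else
      match PySem.Str.pyGet? a (p + j) with
      | none => q                                            -- IndexError (outside Pre_)
      | some c =>
        if c ≠ 'C' ∧ (p + j, s) ∉ ex then jloopA n m a p s ex (j + 1) (q ++ [(p + j, s)])
        else jloopA n m a p s ex (j + 1) q
  else q
termination_by (m + 1 - j).toNat
decreasing_by all_goals omega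

-- "if c_pos == -1 or a[c_pos] == 'L': <jump loop>"
def jumpA (n m : Int) (a : String) (cur : Int × Int) (ex' : PySem.Set (Int × Int)) (rest : List (Int × Int)) : List (Int × Int) :=
  if cur.1 = -1 ∨ PySem.Str.pyGet? a cur.1 = some 'L' then jloopA n m a cur.1 cur.2 ex' 1 rest else rest

-- "if c_swim < k: <append the swim move>"
def swimA (n k : Int) (a : String) (cur : Int × Int) (ex' : PySem.Set (Int × Int)) (q1 : List (Int × Int)) : List (Int × Int) :=
  if cur.2 < k then
    if cur.1 + 1 = n ∧ (cur.1 + 1, cur.2 + 1) ∉ ex' then q1 ++ [(cur.1 + 1, cur.2 + 1)]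
    else
      match PySem.Str.pyGet? a (cur.1 + 1) with
      | none => q1                                           -- IndexError (outside Pre_)
      | some c => if c ≠ 'C' ∧ (cur.1 + 1, cur.2 + 1) ∉ ex' then q1 ++ [(cur.1 + 1, cur.2 + 1)] else q1
  else q1

-- the while loop; the fuel argument only bounds the number of iterations (shown sufficient below)
def loopA (n m k : Int) (a : String) : Nat → List (Int × Int) → PySem.Set (Int × Int) → String
  | _, [], _ => "NO"
  | 0, _ :: _, _ => "NO"                                     -- fuel exhausted (never reached under Pre_)
  | fuel + 1, cur :: rest, ex =>
    if cur.1 = n then "YES"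
    else if cur ∈ ex then loopA n m k a fuel rest ex
    else loopA n m k a fuel
           (swimA n k a cur (PySem.Set.add ex cur) (jumpA n m a cur (PySem.Set.add ex cur) rest))
           (PySem.Set.add ex cur)

def solve (n : Int) (m : Int) (k : Int) (a : String) : String :=
  loopA n m k a ((n.toNat + 2) * (k.toNat + 1) * (m.toNat + 2) + 2) [(-1, 0)] PySem.Set.empty

-- ===== PORT B =====
-- 'if best[q] is None or v < best[q]: best[q] = v'
def relaxB (best : List (Option Int)) (q v : Int) : List (Option Int) :=
  match PySem.List.pyGet? best q with
  | none => best                                             -- IndexError (outside Pre_)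
  | some none => best.set q.toNat (some v)
  | some (some w) => if v < w then best.set q.toNat (some v) else best

-- inner 'for j in range(1, m+1)' with the two breaks
def bloopJ (n m : Int) (a : String) (p s : Int) (j : Int) (best : List (Option Int)) : List (Option Int) :=
  if _h : j < m + 1 then
    if p + j > n then best                                   -- break
    else if p + j = n then relaxB best (p + j) s             -- relax the far bank; break
    else
      match PySem.Str.pyGet? a (p + j) with
      | none => best                                         -- IndexError (outside Pre_)
      | some c =>
        if c ≠ 'C' then bloopJ n m a p s (j + 1) (relaxB best (p + j) s)
        else bloopJ n m a p s (j + 1) best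
  else best
termination_by (m + 1 - j).toNat
decreasing_by all_goals omega

-- "s = 0" for the bank, else best[p] (None = unreachable, skip)
def readP (best : List (Option Int)) (p : Int) : Option Int :=
  if p = -1 then some 0
  else
    match PySem.List.pyGet? best p with
    | some (some v) => some v
    | _ => none                                              -- best[p] is None: continue

-- "if p == -1 or a[p] == 'L': <jump loop>"
def jumpB (n m : Int) (a : String) (p s : Int) (best : List (Option Int)) : List (Option Int) :=
  if p = -1 ∨ PySem.Str.pyGet? a p = some 'L' then bloopJ n m a p s 1 best else best

-- "if s < k: <relax the swim move>"
def swimB (n k : Int) (a : String) (p s : Int) (b1 : List (Option Int)) : List (Option Int) :=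
  if s < k then
    if p + 1 = n then relaxB b1 (p + 1) (s + 1)
    else
      match PySem.Str.pyGet? a (p + 1) with
      | none => b1                                           -- IndexError (outside Pre_)
      | some c => if c ≠ 'C' then relaxB b1 (p + 1) (s + 1) else b1
  else b1

-- outer 'for p in range(-1, n)'
def bloopP (n m k : Int) (a : String) (p : Int) (best : List (Option Int)) : List (Option Int) :=
  if _h : p < n then
    match readP best p with
    | none => bloopP n m k a (p + 1) best
    | some s => bloopP n m k a (p + 1) (swimB n k a p s (jumpB n m a p s best))
  else best
termination_by (n - p).toNat
decreasing_by all_goals omega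

def solve_alt (n : Int) (m : Int) (k : Int) (a : String) : String :=
  match PySem.List.pyGet? (bloopP n m k a (-1) (List.replicate (n + 1).toNat none)) n with
  | some (some _) => "YES"
  | _ => "NO"

-- ===== PRECONDITION & SPEC =====
-- Pre_ asks for the problem's natural domain (a river description of at least n cells), plus the
-- degenerate m < 1 ∧ k < 1 inputs on which neither program ever reads the string: for n < 0 B's
-- best[n] read is out of range, and on the remaining short-string inputs both programs index past
-- the end of a (IndexError) whenever the search touches a missing cell — where by luck it does
-- not, A and B still return the same value, but it is not claimed here.
def Pre_solve (n : Int) (m : Int) (k : Int) (a : String) : Prop :=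
  0 ≤ n ∧ (n ≤ (a.toList.length : Int) ∨ (m < 1 ∧ k < 1))
instance (n : Int) (m : Int) (k : Int) (a : String) : Decidable (Pre_solve n m k a) := by unfold Pre_solve; infer_instance
def pvWitness_solve : Int × Int × Int × String := (3, 2, 0, "WLW")
def Spec_solve (n : Int) (m : Int) (k : Int) (a : String) (out : String) : Prop := out = solve_alt n m k a
instance (n : Int) (m : Int) (k : Int) (a : String) (out : String) : Decidable (Spec_solve n m k a out) := by unfold Spec_solve; infer_instance

-- ===== CLAIM (what is proved, stated in full; the proofs are below) =====
def Claim_equal_solve : Prop := ∀ (n : Int) (m : Int) (k : Int) (a : String), Dom_solve n m k a → Pre_solve n m k a → Spec_solve n m k a (solve n m k a)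

-- ===== LEMMAS AND PROOFS =====

-- the one-move relation of the game both programs search: from c, jump from the bank or a log
-- (same swim count), or swim one cell forward (swim count + 1); landing cells are n or non-'C'
def okStep (n : Int) (a : String) (q : Int) : Prop :=
  q = n ∨ ∃ c, PySem.Str.pyGet? a q = some c ∧ c ≠ 'C'

def stepR (n m k : Int) (a : String) (c d : Int × Int) : Prop :=
  c.1 < n ∧
  (((c.1 = -1 ∨ PySem.Str.pyGet? a c.1 = some 'L') ∧ d.2 = c.2 ∧ c.1 + 1 ≤ d.1 ∧ d.1 ≤ c.1 + m ∧ d.1 ≤ n ∧ okStep n a d.1)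
   ∨ (c.2 < k ∧ d.1 = c.1 + 1 ∧ d.2 = c.2 + 1 ∧ okStep n a d.1))

inductive ReachS (n m k : Int) (a : String) : Int × Int → Prop
  | start : ReachS n m k a (-1, 0)
  | step : ∀ {c d}, ReachS n m k a c → stepR n m k a c d → ReachS n m k a d

-- reachability using only intermediate positions < p (the part of the graph B has already swept)
inductive ReachB (n m k : Int) (a : String) (p : Int) : Int × Int → Prop
  | start : ReachB n m k a p (-1, 0)
  | step : ∀ {c d}, ReachB n m k a p c → c.1 < p → stepR n m k a c d → ReachB n m k a p d

lemma stepR_incr {n m k : Int} {a : String} {c d : Int × Int} (h : stepR n m k a c d) :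
    c.1 < d.1 ∧ d.1 ≤ n ∧ c.2 ≤ d.2 := by
  obtain ⟨hlt, h | h⟩ := h
  · obtain ⟨_, h2, h3, _, h5, _⟩ := h; omega
  · obtain ⟨_, h2, h3, _⟩ := h; omega

lemma reachS_range {n m k : Int} {a : String} {d : Int × Int} (h0 : 0 ≤ n)
    (h : ReachS n m k a d) : -1 ≤ d.1 ∧ d.1 ≤ n ∧ 0 ≤ d.2 ∧ d.2 ≤ (k.toNat : Int) := by
  induction h with
  | start => refine ⟨by omega, by omega, by omega, by omega⟩
  | step hc hs ih =>
    obtain ⟨hlt, hj | hj⟩ := hs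
    · obtain ⟨_, h2, h3, _, h5, _⟩ := hj; omega
    · obtain ⟨hk, h2, h3, _⟩ := hj; omega

lemma reachB_reachS {n m k : Int} {a : String} {p : Int} {d : Int × Int}
    (h : ReachB n m k a p d) : ReachS n m k a d := by
  induction h with
  | start => exact ReachS.start
  | step hc hlt hs ih => exact ReachS.step ih hs

lemma reachB_shrink {n m k : Int} {a : String} {p p' : Int} {d : Int × Int}
    (h : ReachB n m k a p d) (h1 : d.1 ≤ p') (h2 : p' ≤ p) : ReachB n m k a p' d := by
  induction h generalizing p' with
  | start => exact ReachB.start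
  | @step c d hc hlt hs ih =>
    have hcd := stepR_incr hs
    exact ReachB.step (ih (by omega) (by omega)) (by omega) hs

lemma reachS_reachB {n m k : Int} {a : String} {p : Int} {d : Int × Int}
    (h : ReachS n m k a d) (h1 : d.1 ≤ p) : ReachB n m k a p d := by
  induction h generalizing p with
  | start => exact ReachB.start
  | @step c d hc hs ih =>
    have hcd := stepR_incr hs
    exact ReachB.step (ih (by omega)) (by omega) hs

-- ---------- A side ----------

noncomputable def UnivA (n k : Int) : Finset (Int × Int) := Finset.Icc (-1) n ×ˢ Finset.Icc 0 (k.toNat : Int)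

noncomputable def muA (n m k : Int) (ex queue : List (Int × Int)) : Nat :=
  ((UnivA n k).card - ex.length) * (m.toNat + 2) + queue.length

structure InvA (n m k : Int) (a : String) (queue ex : List (Int × Int)) : Prop where
  nodup : ex.Nodup
  exNotGoal : ∀ c ∈ ex, c.1 ≠ n
  exBound : ∀ c ∈ ex, c ∈ UnivA n k
  qReach : ∀ c ∈ queue, ReachS n m k a c
  qBound : ∀ c ∈ queue, c ∈ UnivA n k
  closed : ∀ c ∈ ex, ∀ d, stepR n m k a c d → d ∈ ex ∨ d ∈ queue
  startIn : (-1, 0) ∈ ex ∨ (-1, 0) ∈ queue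

lemma jloopA_len (n m : Int) (a : String) (p s : Int) (ex : PySem.Set (Int × Int)) :
    ∀ j q, (jloopA n m a p s ex j q).length ≤ q.length + (m + 1 - j).toNat := by
  intro j q
  rw [jloopA]
  split
  · split
    · simp only [List.length_append, List.length_cons, List.length_nil]; omega
    · split
      · omega
      · split
        · have := jloopA_len n m a p s ex (j + 1) (q ++ [(p + j, s)])
          simp only [List.length_append, List.length_cons, List.length_nil] at this; omega
        · have := jloopA_len n m a p s ex (j + 1) q
          omega
  · omega
termination_by j _ => (m + 1 - j).toNat
decreasing_by all_goals omega

lemma jloopA_mem (n m : Int) (a : String) (p s : Int) (ex : List (Int × Int))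
    (h0 : 0 ≤ n) (hlen : n ≤ (a.toList.length : Int)) (hp : -1 ≤ p)
    (hgoal : ∀ s', (n, s') ∉ ex) :
    ∀ j q x, 1 ≤ j → p + j ≤ n →
      (x ∈ jloopA n m a p s ex j q ↔
        x ∈ q ∨ (x ∉ ex ∧ ∃ jj, j ≤ jj ∧ jj ≤ m ∧ x = (p + jj, s) ∧ p + jj ≤ n ∧ okStep n a (p + jj))) := by
  intro j q x hj hjn
  rw [jloopA]
  split
  · rename_i hjm
    split
    · rename_i hbrk
      obtain ⟨hpj, hnex⟩ := hbrk
      simp only [List.mem_append, List.mem_cons, List.not_mem_nil, or_false]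
      constructor
      · rintro (hx | hx)
        · exact Or.inl hx
        · exact Or.inr ⟨hx ▸ hnex, j, le_refl _, by omega, hx, by omega, Or.inl hpj⟩
      · rintro (hx | ⟨hnex', jj, h1, h2, hxe, h3, hok⟩)
        · exact Or.inl hx
        · have : jj = j := by omega
          subst this
          exact Or.inr hxe
    · rename_i hbrk
      have hne : p + j ≠ n := by
        intro h
        exact hbrk ⟨h, fun hmem => hgoal s (h ▸ hmem)⟩
      have hsome : PySem.Str.pyGet? a (p + j) = some (a.toList[(p + j).toNat]'(by omega)) := by
        have : PySem.Str.pyGet? a (p + j) = PySem.List.pyGet? a.toList (p + j) := by simp [pysem]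
        rw [this]
        exact PySem.List.pyGet?_eq_some_getElem a.toList (by omega) (by omega)
      rw [hsome]
      simp only []
      split
      · rename_i hcc
        rw [jloopA_mem n m a p s ex h0 hlen hp hgoal (j + 1) (q ++ [(p + j, s)]) x (by omega) (by omega)]
        simp only [List.mem_append, List.mem_cons, List.not_mem_nil, or_false]
        constructor
        · rintro ((hx | hx) | ⟨hnex', jj, h1, h2, hxe, h3, hok⟩)
          · exact Or.inl hx
          · exact Or.inr ⟨hx ▸ hcc.2, j, le_refl _, by omega, hx, by omega,
              Or.inr ⟨_, hsome, hcc.1⟩⟩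
          · exact Or.inr ⟨hnex', jj, by omega, h2, hxe, h3, hok⟩
        · rintro (hx | ⟨hnex', jj, h1, h2, hxe, h3, hok⟩)
          · exact Or.inl (Or.inl hx)
          · by_cases hjj : jj = j
            · subst hjj
              exact Or.inl (Or.inr hxe)
            · exact Or.inr ⟨hnex', jj, by omega, h2, hxe, h3, hok⟩
      · rename_i hcc
        rw [jloopA_mem n m a p s ex h0 hlen hp hgoal (j + 1) q x (by omega) (by omega)]
        constructor
        · rintro (hx | ⟨hnex', jj, h1, h2, hxe, h3, hok⟩)
          · exact Or.inl hx
          · exact Or.inr ⟨hnex', jj, by omega, h2, hxe, h3, hok⟩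
        · rintro (hx | ⟨hnex', jj, h1, h2, hxe, h3, hok⟩)
          · exact Or.inl hx
          · by_cases hjj : jj = j
            · subst hjj
              exfalso
              rcases not_and_or.mp hcc with hC | hmem
              · rcases hok with hn2 | ⟨c', hc', hcC⟩
                · exact hne hn2
                · rw [hsome] at hc'
                  exact hcC ((Option.some_inj.mp hc').symm.trans (not_not.mp hC))
              · exact hnex' (hxe ▸ not_not.mp hmem)
            · exact Or.inr ⟨hnex', jj, by omega, h2, hxe, h3, hok⟩
  · rename_i hjm
    constructor
    · exact fun hx => Or.inl hx
    · rintro (hx | ⟨_, jj, h1, h2, _, _, _⟩)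
      · exact hx
      · exact absurd h2 (by omega)
termination_by j q x => (m + 1 - j).toNat
decreasing_by all_goals omega

lemma closure_reach {n m k : Int} {a : String} {ex : List (Int × Int)}
    (hstart : (-1, 0) ∈ ex) (hclosed : ∀ c ∈ ex, ∀ d, stepR n m k a c d → d ∈ ex) :
    ∀ d, ReachS n m k a d → d ∈ ex := by
  intro d hd
  induction hd with
  | start => exact hstart
  | @step c d hc hs ih => exact hclosed c ih d hs

lemma mem_UnivA (n k : Int) (c : Int × Int) :
    c ∈ UnivA n k ↔ (-1 ≤ c.1 ∧ c.1 ≤ n) ∧ (0 ≤ c.2 ∧ c.2 ≤ (k.toNat : Int)) := by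
  unfold UnivA
  simp [Finset.mem_product, Finset.mem_Icc]

lemma nodup_length_le {U : Finset (Int × Int)} {l : List (Int × Int)}
    (h1 : l.Nodup) (h2 : ∀ c ∈ l, c ∈ U) : l.length ≤ U.card := by
  have hsub : l.toFinset ⊆ U := fun x hx => h2 x (List.mem_toFinset.mp hx)
  calc l.length = l.toFinset.card := (List.toFinset_card_of_nodup h1).symm
    _ ≤ U.card := Finset.card_le_card hsub

lemma add_length {ex : PySem.Set (Int × Int)} {cur : Int × Int} (h : cur ∉ ex) :
    (PySem.Set.add ex cur).length = ex.length + 1 := by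
  unfold PySem.Set.add
  rw [if_neg (by simp [h])]
  simp

lemma loopA_yes (n m k : Int) (a : String) (h0 : 0 ≤ n) (hlen : n ≤ (a.toList.length : Int)) :
    ∀ fuel queue ex, InvA n m k a queue ex → muA n m k ex queue < fuel →
      (loopA n m k a fuel queue ex = "YES" ↔ ∃ s, ReachS n m k a (n, s)) := by
  intro fuel
  induction fuel with
  | zero =>
    intro queue ex _ hmu
    exact absurd hmu (Nat.not_lt_zero _)
  | succ f ih =>
    intro queue ex inv hmu
    cases queue with
    | nil =>
      have hno : loopA n m k a (f + 1) [] ex = "NO" := by rw [loopA]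
      have hclosed : ∀ c ∈ ex, ∀ d, stepR n m k a c d → d ∈ ex := by
        intro c hc d hd
        rcases inv.closed c hc d hd with h | h
        · exact h
        · exact absurd h (List.not_mem_nil)
      have hstart : (-1, 0) ∈ ex := by
        rcases inv.startIn with h | h
        · exact h
        · exact absurd h (List.not_mem_nil)
      rw [hno]
      constructor
      · intro h
        exact absurd h (by decide)
      · rintro ⟨sw, hsw⟩
        exact absurd rfl (inv.exNotGoal _ (closure_reach hstart hclosed (n, sw) hsw))
    | cons cur rest =>
      rw [loopA]
      by_cases hgl : cur.1 = n
      · rw [if_pos hgl]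
        constructor
        · intro _
          refine ⟨cur.2, ?_⟩
          have hr := inv.qReach cur (List.mem_cons_self)
          have : (n, cur.2) = cur := by
            rw [← hgl]
          rw [this]
          exact hr
        · intro _
          rfl
      · rw [if_neg hgl]
        by_cases hmem : cur ∈ ex
        · rw [if_pos hmem]
          refine ih rest ex ⟨inv.nodup, inv.exNotGoal, inv.exBound,
            fun c hc => inv.qReach c (List.mem_cons_of_mem _ hc),
            fun c hc => inv.qBound c (List.mem_cons_of_mem _ hc), ?_, ?_⟩ ?_
          · intro c hc d hd
            rcases inv.closed c hc d hd with h | h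
            · exact Or.inl h
            · rcases List.mem_cons.mp h with h | h
              · exact Or.inl (h ▸ hmem)
              · exact Or.inr h
          · rcases inv.startIn with h | h
            · exact Or.inl h
            · rcases List.mem_cons.mp h with h | h
              · exact Or.inl (h ▸ hmem)
              · exact Or.inr h
          · unfold muA at hmu ⊢
            simp only [List.length_cons] at hmu
            omega
        · rw [if_neg hmem]
          have hcb := (mem_UnivA n k cur).mp (inv.qBound cur (List.mem_cons_self))
          have hcur1 : cur.1 < n := by
            rcases hcb with ⟨⟨_, h⟩, _⟩
            omega
          have hcurm1 : -1 ≤ cur.1 := hcb.1.1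
          have hgoalex' : ∀ s', (n, s') ∉ PySem.Set.add ex cur := by
            intro s' hmem'
            rcases (PySem.Set.mem_add ex cur (n, s')).mp hmem' with h | h
            · exact inv.exNotGoal _ h rfl
            · exact hgl (congrArg Prod.fst h).symm
          -- membership in the queue after the jump pass
          have hjq : ∀ x, x ∈ jumpA n m a cur (PySem.Set.add ex cur) rest ↔
              x ∈ rest ∨ ((cur.1 = -1 ∨ PySem.Str.pyGet? a cur.1 = some 'L') ∧
                x ∉ PySem.Set.add ex cur ∧
                ∃ jj, 1 ≤ jj ∧ jj ≤ m ∧ x = (cur.1 + jj, cur.2) ∧ cur.1 + jj ≤ n ∧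
                  okStep n a (cur.1 + jj)) := by
            intro x
            unfold jumpA
            by_cases hbr : cur.1 = -1 ∨ PySem.Str.pyGet? a cur.1 = some 'L'
            · rw [if_pos hbr,
                jloopA_mem n m a cur.1 cur.2 (PySem.Set.add ex cur) h0 hlen hcurm1 hgoalex'
                  1 rest x (le_refl _) (by omega)]
              constructor
              · rintro (h | ⟨h1, jj, h2, h3, h4, h5, h6⟩)
                · exact Or.inl h
                · exact Or.inr ⟨hbr, h1, jj, h2, h3, h4, h5, h6⟩
              · rintro (h | ⟨_, h1, jj, h2, h3, h4, h5, h6⟩)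
                · exact Or.inl h
                · exact Or.inr ⟨h1, jj, h2, h3, h4, h5, h6⟩
            · rw [if_neg hbr]
              constructor
              · exact fun h => Or.inl h
              · rintro (h | ⟨hb, _⟩)
                · exact h
                · exact absurd hb hbr
          -- membership in the queue after the swim pass
          have hsq : ∀ x, x ∈ swimA n k a cur (PySem.Set.add ex cur)
                (jumpA n m a cur (PySem.Set.add ex cur) rest) ↔
              x ∈ jumpA n m a cur (PySem.Set.add ex cur) rest ∨
              (cur.2 < k ∧ x = (cur.1 + 1, cur.2 + 1) ∧ x ∉ PySem.Set.add ex cur ∧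
                okStep n a (cur.1 + 1)) := by
            intro x
            unfold swimA
            by_cases hk : cur.2 < k
            · rw [if_pos hk]
              by_cases hfirst : cur.1 + 1 = n ∧ (cur.1 + 1, cur.2 + 1) ∉ PySem.Set.add ex cur
              · rw [if_pos hfirst]
                simp only [List.mem_append, List.mem_cons, List.not_mem_nil, or_false]
                constructor
                · rintro (h | h)
                  · exact Or.inl h
                  · exact Or.inr ⟨hk, h, h ▸ hfirst.2, Or.inl hfirst.1⟩
                · rintro (h | ⟨_, h, _⟩)
                  · exact Or.inl h
                  · exact Or.inr h
              · rw [if_neg hfirst]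
                have hne : cur.1 + 1 ≠ n := by
                  intro h
                  exact hfirst ⟨h, h ▸ hgoalex' (cur.2 + 1)⟩
                have hsome : PySem.Str.pyGet? a (cur.1 + 1) =
                    some (a.toList[(cur.1 + 1).toNat]'(by omega)) := by
                  have hbr2 : PySem.Str.pyGet? a (cur.1 + 1) =
                      PySem.List.pyGet? a.toList (cur.1 + 1) := by simp [pysem]
                  rw [hbr2]
                  exact PySem.List.pyGet?_eq_some_getElem a.toList (by omega) (by omega)
                rw [hsome]
                simp only []
                split
                · rename_i hcc
                  simp only [List.mem_append, List.mem_cons, List.not_mem_nil, or_false]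
                  constructor
                  · rintro (h | h)
                    · exact Or.inl h
                    · exact Or.inr ⟨hk, h, h ▸ hcc.2, Or.inr ⟨_, hsome, hcc.1⟩⟩
                  · rintro (h | ⟨_, h, _⟩)
                    · exact Or.inl h
                    · exact Or.inr h
                · rename_i hcc
                  constructor
                  · exact fun h => Or.inl h
                  · rintro (h | ⟨_, hx, hnx, hok⟩)
                    · exact h
                    · exfalso
                      rcases not_and_or.mp hcc with hC | hmem'
                      · rcases hok with h | ⟨c', hc', h2⟩
                        · exact hne h
                        · rw [hsome] at hc'
                          exact h2 ((Option.some_inj.mp hc').symm.trans (not_not.mp hC))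
                      · exact hnx (hx ▸ not_not.mp hmem')
            · rw [if_neg hk]
              constructor
              · exact fun h => Or.inl h
              · rintro (h | ⟨hk', _⟩)
                · exact h
                · exact absurd hk' hk
          -- the two passes together append exactly the fresh successors of cur
          have hsucc : ∀ x, x ∈ swimA n k a cur (PySem.Set.add ex cur)
                (jumpA n m a cur (PySem.Set.add ex cur) rest) ↔
              x ∈ rest ∨ (stepR n m k a cur x ∧ x ∉ PySem.Set.add ex cur) := by
            intro x
            rw [hsq, hjq]
            constructor
            · rintro ((h | ⟨hbr, h1, jj, h2, h3, h4, h5, h6⟩) | ⟨hk, hx, hnx, hok⟩)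
              · exact Or.inl h
              · refine Or.inr ⟨⟨hcur1, Or.inl ⟨hbr, ?_, ?_, ?_, ?_, ?_⟩⟩, h1⟩ <;>
                  rw [h4] <;> first | rfl | (simp only []; omega) | exact h6
              · refine Or.inr ⟨⟨hcur1, Or.inr ⟨hk, ?_, ?_, ?_⟩⟩, hnx⟩ <;>
                  rw [hx] <;> first | rfl | exact hok
            · rintro (h | ⟨⟨hlt, hj | hj⟩, hnx⟩)
              · exact Or.inl (Or.inl h)
              · obtain ⟨hbr, hx2, h1, h2, h3, hok⟩ := hj
                refine Or.inl (Or.inr ⟨hbr, hnx, x.1 - cur.1, by omega, by omega, ?_, by omega,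
                  by rw [show cur.1 + (x.1 - cur.1) = x.1 by omega]; exact hok⟩)
                rw [show cur.1 + (x.1 - cur.1) = x.1 by omega, ← hx2]
              · obtain ⟨hk, hx1, hx2, hok⟩ := hj
                refine Or.inr ⟨hk, ?_, hnx, ?_⟩
                · rw [← hx1, ← hx2]
                · rw [← hx1]; exact hok
          -- the new invariant
          have hreachcur := inv.qReach cur (List.mem_cons_self)
          have inv' : InvA n m k a
              (swimA n k a cur (PySem.Set.add ex cur)
                (jumpA n m a cur (PySem.Set.add ex cur) rest))
              (PySem.Set.add ex cur) := by
            refine ⟨PySem.Set.nodup_add ex cur inv.nodup, ?_, ?_, ?_, ?_, ?_, ?_⟩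
            · intro c hc
              rcases (PySem.Set.mem_add ex cur c).mp hc with h | h
              · exact inv.exNotGoal c h
              · exact h ▸ hgl
            · intro c hc
              rcases (PySem.Set.mem_add ex cur c).mp hc with h | h
              · exact inv.exBound c h
              · exact h ▸ inv.qBound cur (List.mem_cons_self)
            · intro c hc
              rcases (hsucc c).mp hc with h | ⟨hst, _⟩
              · exact inv.qReach c (List.mem_cons_of_mem _ h)
              · exact ReachS.step hreachcur hst
            · intro c hc
              rcases (hsucc c).mp hc with h | ⟨hst, _⟩
              · exact inv.qBound c (List.mem_cons_of_mem _ h)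
              · have hi := stepR_incr hst
                rw [mem_UnivA]
                rcases hst with ⟨_, hj | hj⟩
                · obtain ⟨_, hx2, _⟩ := hj
                  refine ⟨⟨by omega, by omega⟩, ?_⟩
                  rw [hx2]
                  exact hcb.2
                · obtain ⟨hk, _, hx2, _⟩ := hj
                  exact ⟨⟨by omega, by omega⟩, by omega⟩
            · intro c hc d hd
              rcases (PySem.Set.mem_add ex cur c).mp hc with h | h
              · rcases inv.closed c h d hd with h2 | h2
                · exact Or.inl ((PySem.Set.mem_add ex cur d).mpr (Or.inl h2))
                · rcases List.mem_cons.mp h2 with h3 | h3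
                  · exact Or.inl ((PySem.Set.mem_add ex cur d).mpr (Or.inr h3))
                  · exact Or.inr ((hsucc d).mpr (Or.inl h3))
              · subst h
                by_cases hdx : d ∈ PySem.Set.add ex c
                · exact Or.inl hdx
                · exact Or.inr ((hsucc d).mpr (Or.inr ⟨hd, hdx⟩))
            · rcases inv.startIn with h | h
              · exact Or.inl ((PySem.Set.mem_add ex cur _).mpr (Or.inl h))
              · rcases List.mem_cons.mp h with h | h
                · exact Or.inl ((PySem.Set.mem_add ex cur _).mpr (Or.inr h))
                · exact Or.inr ((hsucc _).mpr (Or.inl h))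
          -- the measure decreases
          have hmu' : muA n m k (PySem.Set.add ex cur)
              (swimA n k a cur (PySem.Set.add ex cur)
                (jumpA n m a cur (PySem.Set.add ex cur) rest)) < f := by
            have hlq1 : (jumpA n m a cur (PySem.Set.add ex cur) rest).length ≤
                rest.length + m.toNat := by
              unfold jumpA
              split
              · have := jloopA_len n m a cur.1 cur.2 (PySem.Set.add ex cur) 1 rest
                omega
              · omega
            have hlq2 : (swimA n k a cur (PySem.Set.add ex cur)
                (jumpA n m a cur (PySem.Set.add ex cur) rest)).length ≤
                (jumpA n m a cur (PySem.Set.add ex cur) rest).length + 1 := by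
              unfold swimA
              split
              · split
                · simp
                · split
                  · omega
                  · split <;> simp
              · omega
            have hexlen : (PySem.Set.add ex cur).length = ex.length + 1 := add_length hmem
            have hexcard : (PySem.Set.add ex cur).length ≤ (UnivA n k).card := by
              refine nodup_length_le (PySem.Set.nodup_add ex cur inv.nodup) ?_
              intro c hc
              rcases (PySem.Set.mem_add ex cur c).mp hc with h | h
              · exact inv.exBound c h
              · exact h ▸ inv.qBound cur (List.mem_cons_self)
            have hsplit : ((UnivA n k).card - ex.length) * (m.toNat + 2) =
                ((UnivA n k).card - (ex.length + 1)) * (m.toNat + 2) + (m.toNat + 2) := by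
              rw [show (UnivA n k).card - ex.length =
                    ((UnivA n k).card - (ex.length + 1)) + 1 by omega, add_mul, one_mul]
            unfold muA at hmu ⊢
            rw [hexlen]
            simp only [List.length_cons] at hmu
            omega
          exact ih _ _ inv' hmu'

lemma loopA_cases (n m k : Int) (a : String) :
    ∀ fuel queue ex, loopA n m k a fuel queue ex = "YES" ∨ loopA n m k a fuel queue ex = "NO" := by
  intro fuel
  induction fuel with
  | zero => intro queue ex; cases queue <;> simp [loopA]
  | succ f ih =>
    intro queue ex
    cases queue with
    | nil => simp [loopA]
    | cons cur rest =>
      rw [loopA]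
      split
      · left; rfl
      · split
        · exact ih _ _
        · exact ih _ _

lemma solveA_yes (n m k : Int) (a : String) (h0 : 0 ≤ n) (hlen : n ≤ (a.toList.length : Int)) :
    (solve n m k a = "YES" ↔ ∃ s, ReachS n m k a (n, s)) := by
  unfold solve
  have hempty : (PySem.Set.empty : PySem.Set (Int × Int)) = [] := rfl
  rw [hempty]
  have inv0 : InvA n m k a [(-1, 0)] [] := by
    refine ⟨List.nodup_nil, ?_, ?_, ?_, ?_, ?_, Or.inr List.mem_cons_self⟩
    · intro c hc; exact absurd hc (List.not_mem_nil)
    · intro c hc; exact absurd hc (List.not_mem_nil)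
    · intro c hc
      rcases List.mem_cons.mp hc with h | h
      · exact h ▸ ReachS.start
      · exact absurd h (List.not_mem_nil)
    · intro c hc
      rcases List.mem_cons.mp hc with h | h
      · subst h
        rw [mem_UnivA]
        refine ⟨⟨le_refl _, by omega⟩, le_refl _, by positivity⟩
      · exact absurd h (List.not_mem_nil)
    · intro c hc; exact absurd hc (List.not_mem_nil)
  have hcard : (UnivA n k).card = (n.toNat + 2) * (k.toNat + 1) := by
    unfold UnivA
    rw [Finset.card_product, Int.card_Icc, Int.card_Icc]
    congr 1 <;> omega
  have hmu : muA n m k [] [(-1, 0)] < (n.toNat + 2) * (k.toNat + 1) * (m.toNat + 2) + 2 := by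
    unfold muA
    rw [hcard]
    simp only [List.length_nil, List.length_cons, Nat.sub_zero]
    generalize (n.toNat + 2) * (k.toNat + 1) * (m.toNat + 2) = u
    omega
  exact loopA_yes n m k a h0 hlen _ _ _ inv0 hmu

-- ---------- B side ----------

-- the value B's table associates with position q (the virtual start cell -1 carries 0 swims)
def getB' (best : List (Option Int)) (q : Int) : Option Int :=
  if q = -1 then some 0 else (best.getD q.toNat none)

def someMin (o : Option Int) (v : Int) : Option Int :=
  some (match o with | none => v | some w => if v < w then v else w)

structure InvB (n m k : Int) (a : String) (p : Int) (best : List (Option Int)) : Prop where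
  len : best.length = (n + 1).toNat
  sound : ∀ q v, -1 ≤ q → q ≤ n → getB' best q = some v → ReachS n m k a (q, v)
  complete : ∀ d, ReachB n m k a p d → ∃ v ≤ d.2, getB' best d.1 = some v

lemma relaxB_len (best : List (Option Int)) (q v : Int) : (relaxB best q v).length = best.length := by
  unfold relaxB
  rcases h : PySem.List.pyGet? best q with _ | _ | w
  · simp [h]
  · simp [h]
  · simp only [h]; split <;> simp

lemma relaxB_get (best : List (Option Int)) (q v : Int) (hq : 0 ≤ q) (hlt : q.toNat < best.length) :
    ∀ r, -1 ≤ r → getB' (relaxB best q v) r = if r = q then someMin (getB' best q) v else getB' best r := by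
  intro r hr
  have hget : PySem.List.pyGet? best q = some best[q.toNat] :=
    PySem.List.pyGet?_eq_some_getElem best hq (by omega)
  have hgq : getB' best q = best[q.toNat] := by
    unfold getB'
    rw [if_neg (by omega), List.getD_eq_getElem?_getD, List.getElem?_eq_getElem hlt]
    rfl
  unfold relaxB
  rw [hget]
  rcases hb : best[q.toNat] with _ | w <;> simp only [hb]
  · -- best[q] is None: write v
    rw [hgq, hb]
    by_cases hrq : r = q
    · subst hrq
      unfold getB' someMin
      rw [if_neg (by omega), if_pos rfl, List.getD_eq_getElem?_getD, List.getElem?_set]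
      simp [hlt]
    · rw [if_neg hrq]
      unfold getB'
      by_cases hr1 : r = -1
      · rw [if_pos hr1, if_pos hr1]
      · rw [if_neg hr1, if_neg hr1, List.getD_eq_getElem?_getD, List.getD_eq_getElem?_getD,
            List.getElem?_set, if_neg (by omega)]
  · -- best[q] = some w
    rw [hgq, hb]
    by_cases hvw : v < w
    · rw [if_pos hvw]
      by_cases hrq : r = q
      · subst hrq
        unfold getB' someMin
        rw [if_neg (by omega), if_pos rfl, List.getD_eq_getElem?_getD, List.getElem?_set]
        simp [hlt, if_pos hvw]
      · rw [if_neg hrq]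
        unfold getB'
        by_cases hr1 : r = -1
        · rw [if_pos hr1, if_pos hr1]
        · rw [if_neg hr1, if_neg hr1, List.getD_eq_getElem?_getD, List.getD_eq_getElem?_getD,
              List.getElem?_set, if_neg (by omega)]
    · rw [if_neg hvw]
      by_cases hrq : r = q
      · subst hrq
        unfold someMin
        rw [if_pos rfl, hgq, hb]
        simp [if_neg hvw]
      · rw [if_neg hrq]

lemma bloopJ_len (n m : Int) (a : String) (p s : Int) :
    ∀ j best, (bloopJ n m a p s j best).length = best.length := by
  intro j best
  rw [bloopJ]
  split
  · split
    · rfl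
    · split
      · exact relaxB_len _ _ _
      · split
        · rfl
        · split
          · rw [bloopJ_len n m a p s (j+1) _, relaxB_len]
          · rw [bloopJ_len]
  · rfl
termination_by j _ => (m + 1 - j).toNat
decreasing_by all_goals omega

lemma bloopJ_get (n m : Int) (a : String) (p s : Int)
    (h0 : 0 ≤ n) (hlen : n ≤ (a.toList.length : Int)) (hp : -1 ≤ p) :
    ∀ j best, 1 ≤ j → p + j ≤ n → best.length = (n + 1).toNat →
      ∀ r, -1 ≤ r →
           (p + j ≤ r ∧ r ≤ p + m ∧ r ≤ n ∧ okStep n a r →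
              getB' (bloopJ n m a p s j best) r = someMin (getB' best r) s) ∧
           (¬(p + j ≤ r ∧ r ≤ p + m ∧ r ≤ n ∧ okStep n a r) →
              getB' (bloopJ n m a p s j best) r = getB' best r) := by
  intro j best hj hjn hlenb r hr
  rw [bloopJ]
  split
  · rename_i hjm
    split
    · rename_i hgt
      exact absurd hjn (by omega)
    · split
      · rename_i hpj
        have hrel := relaxB_get best (p + j) s (by omega) (by omega) r hr
        constructor
        · intro hc
          have hrq : r = p + j := by omega
          subst hrq
          rw [hrel, if_pos rfl]
        · intro hc
          rw [hrel, if_neg ?_]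
          intro hrq
          exact hc ⟨by omega, by omega, by omega, hrq ▸ Or.inl hpj⟩
      · rename_i hgt hne
        have hpjn : p + j < n := by omega
        have hsome : PySem.Str.pyGet? a (p + j) = some (a.toList[(p + j).toNat]'(by omega)) := by
          have hbr : PySem.Str.pyGet? a (p + j) = PySem.List.pyGet? a.toList (p + j) := by simp [pysem]
          rw [hbr]
          exact PySem.List.pyGet?_eq_some_getElem a.toList (by omega) (by omega)
        rw [hsome]
        simp only []
        split
        · rename_i hcC
          have hok : okStep n a (p + j) := Or.inr ⟨_, hsome, hcC⟩
          have hlen2 : (relaxB best (p + j) s).length = best.length := relaxB_len _ _ _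
          have hrec := bloopJ_get n m a p s h0 hlen hp (j + 1) (relaxB best (p + j) s)
            (by omega) (by omega) (by rw [hlen2]; exact hlenb) r hr
          have hrel := relaxB_get best (p + j) s (by omega) (by omega) r hr
          constructor
          · intro hc
            by_cases hrq : r = p + j
            · rw [hrec.2 (by omega), hrel, if_pos hrq, hrq]
            · rw [hrec.1 ⟨by omega, hc.2⟩, hrel, if_neg hrq]
          · intro hc
            rw [hrec.2 (fun h => hc ⟨by omega, h.2⟩), hrel, if_neg ?_]
            intro hrq
            exact hc ⟨by omega, by omega, by omega, hrq ▸ hok⟩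
        · rename_i hcC
          have hnok : ¬ okStep n a (p + j) := by
            rintro (hn2 | ⟨c', hc', h2⟩)
            · omega
            · rw [hsome] at hc'
              exact h2 ((Option.some_inj.mp hc').symm.trans (not_not.mp hcC))
          have hrec := bloopJ_get n m a p s h0 hlen hp (j + 1) best (by omega) (by omega) hlenb r hr
          constructor
          · intro hc
            have hrq : r ≠ p + j := fun h => hnok (h ▸ hc.2.2.2)
            exact hrec.1 ⟨by omega, hc.2⟩
          · intro hc
            exact hrec.2 (fun h => hc ⟨by omega, h.2⟩)
  · rename_i hjm
    refine ⟨fun hc => ?_, fun _ => rfl⟩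
    obtain ⟨h1, h2, -⟩ := hc
    exact absurd h1 (by omega)
termination_by j best => (m + 1 - j).toNat
decreasing_by all_goals omega

lemma getB'_neg_one (best : List (Option Int)) : getB' best (-1) = some 0 := by
  unfold getB'; rw [if_pos rfl]

lemma someMin_spec (o : Option Int) (v : Int) :
    ∃ u, someMin o v = some u ∧ u ≤ v ∧ ∀ w, o = some w → u ≤ w := by
  unfold someMin
  rcases o with _ | w
  · exact ⟨v, rfl, le_refl _, by simp⟩
  · by_cases hvw : v < w
    · exact ⟨v, by simp [hvw], le_refl _, by simp; omega⟩
    · exact ⟨w, by simp [hvw], by omega, by simp⟩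

lemma someMin_cases {o : Option Int} {v u : Int} (h : someMin o v = some u) :
    u = v ∨ o = some u := by
  unfold someMin at h
  rcases o with _ | w
  · exact Or.inl (Option.some_inj.mp h).symm
  · simp only [] at h
    by_cases hvw : v < w
    · rw [if_pos hvw] at h
      exact Or.inl (Option.some_inj.mp h).symm
    · rw [if_neg hvw] at h
      exact Or.inr (by rw [Option.some_inj.mp h])

lemma reachB_succ_none {n m k : Int} {a : String} {p : Int} {best : List (Option Int)}
    (hnone : getB' best p = none)
    (compl : ∀ d, ReachB n m k a p d → ∃ v ≤ d.2, getB' best d.1 = some v) :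
    ∀ d, ReachB n m k a (p + 1) d → ∃ v ≤ d.2, getB' best d.1 = some v := by
  intro d hd
  induction hd with
  | start => exact compl _ ReachB.start
  | @step c d hc hlt hs ih =>
    by_cases hcp : c.1 = p
    · obtain ⟨v, _, hg⟩ := ih
      rw [hcp, hnone] at hg
      cases hg
    · exact compl d (ReachB.step (reachB_shrink hc (by omega) (by omega)) (by omega) hs)

lemma bloopP_inv (n m k : Int) (a : String) (h0 : 0 ≤ n) (hlen : n ≤ (a.toList.length : Int)) :
    ∀ p best, -1 ≤ p → p ≤ n → InvB n m k a p best →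
      InvB n m k a n (bloopP n m k a p best) := by
  intro p best hp hpn inv
  rw [bloopP]
  split
  · rename_i hplt
    have hread : readP best p = getB' best p := by
      unfold readP getB'
      by_cases h1 : p = -1
      · rw [if_pos h1, if_pos h1]
      · rw [if_neg h1, if_neg h1]
        have hplt2 : p.toNat < best.length := by
          have := inv.len; omega
        have hg : PySem.List.pyGet? best p = some best[p.toNat] :=
          PySem.List.pyGet?_eq_some_getElem best (by omega) (by omega)
        rw [hg, List.getD_eq_getElem?_getD, List.getElem?_eq_getElem hplt2]
        rcases hbp : best[p.toNat] with _ | v <;> simp [hbp]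
    rcases hso : getB' best p with _ | sv
    · rw [hread, hso]
      exact bloopP_inv n m k a h0 hlen (p + 1) best (by omega) (by omega)
        ⟨inv.len, inv.sound, reachB_succ_none hso inv.complete⟩
    · rw [hread, hso]
      -- position p is reachable with minimal swim count sv
      have hreachp : ReachS n m k a (p, sv) := inv.sound p sv hp (by omega) hso
      have hlen1 : (jumpB n m a p sv best).length = best.length := by
        unfold jumpB; split
        · exact bloopJ_len n m a p sv 1 best
        · rfl
      -- characterisation of the jump pass
      have char1 : ∀ r, -1 ≤ r →
          ((p = -1 ∨ PySem.Str.pyGet? a p = some 'L') ∧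
             (p + 1 ≤ r ∧ r ≤ p + m ∧ r ≤ n ∧ okStep n a r) →
            getB' (jumpB n m a p sv best) r = someMin (getB' best r) sv) ∧
          (¬((p = -1 ∨ PySem.Str.pyGet? a p = some 'L') ∧
             (p + 1 ≤ r ∧ r ≤ p + m ∧ r ≤ n ∧ okStep n a r)) →
            getB' (jumpB n m a p sv best) r = getB' best r) := by
        intro r hr
        unfold jumpB
        by_cases hbr : p = -1 ∨ PySem.Str.pyGet? a p = some 'L'
        · rw [if_pos hbr]
          have hc := bloopJ_get n m a p sv h0 hlen hp 1 best (le_refl _) (by omega) inv.len r hr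
          exact ⟨fun h => hc.1 h.2, fun h => hc.2 (fun h2 => h ⟨hbr, h2⟩)⟩
        · rw [if_neg hbr]
          exact ⟨fun h => absurd h.1 hbr, fun _ => rfl⟩
      -- characterisation of the swim pass
      have char2 : ∀ r, -1 ≤ r →
          (sv < k ∧ r = p + 1 ∧ okStep n a (p + 1) →
            getB' (swimB n k a p sv (jumpB n m a p sv best)) r =
              someMin (getB' (jumpB n m a p sv best) r) (sv + 1)) ∧
          (¬(sv < k ∧ okStep n a (p + 1)) ∨ r ≠ p + 1 →
            getB' (swimB n k a p sv (jumpB n m a p sv best)) r =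
              getB' (jumpB n m a p sv best) r) := by
        intro r hr
        unfold swimB
        by_cases hk : sv < k
        · rw [if_pos hk]
          by_cases hpn1 : p + 1 = n
          · rw [if_pos hpn1]
            have hrel := relaxB_get (jumpB n m a p sv best) (p + 1) (sv + 1) (by omega)
              (by rw [hlen1]; have := inv.len; omega) r hr
            constructor
            · intro h
              rw [hrel, if_pos h.2.1]
              rw [h.2.1]
            · intro h
              rw [hrel, if_neg ?_]
              intro hrq
              rcases h with h | h
              · exact h ⟨hk, hpn1 ▸ Or.inl rfl⟩
              · exact h hrq
          · rw [if_neg hpn1]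
            have hsome : PySem.Str.pyGet? a (p + 1) = some (a.toList[(p + 1).toNat]'(by omega)) := by
              have hbr2 : PySem.Str.pyGet? a (p + 1) = PySem.List.pyGet? a.toList (p + 1) := by
                simp [pysem]
              rw [hbr2]
              exact PySem.List.pyGet?_eq_some_getElem a.toList (by omega) (by omega)
            rw [hsome]
            simp only []
            split
            · rename_i hcC
              have hok : okStep n a (p + 1) := Or.inr ⟨_, hsome, hcC⟩
              have hrel := relaxB_get (jumpB n m a p sv best) (p + 1) (sv + 1) (by omega)
                (by rw [hlen1]; have := inv.len; omega) r hr
              constructor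
              · intro h
                rw [hrel, if_pos h.2.1, h.2.1]
              · intro h
                rw [hrel, if_neg ?_]
                intro hrq
                rcases h with h | h
                · exact h ⟨hk, hok⟩
                · exact h hrq
            · rename_i hcC
              have hnok : ¬ okStep n a (p + 1) := by
                rintro (hn2 | ⟨c', hc', h2⟩)
                · exact hpn1 hn2
                · rw [hsome] at hc'
                  exact h2 ((Option.some_inj.mp hc').symm.trans (not_not.mp hcC))
              exact ⟨fun h => absurd h.2.2 hnok, fun _ => rfl⟩
        · rw [if_neg hk]
          exact ⟨fun h => absurd h.1 hk, fun _ => rfl⟩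
      -- soundness after both passes
      have sound1 : ∀ q v, -1 ≤ q → q ≤ n → getB' (jumpB n m a p sv best) q = some v →
          ReachS n m k a (q, v) := by
        intro q v h1 h2 hgv
        by_cases hcnd : (p = -1 ∨ PySem.Str.pyGet? a p = some 'L') ∧
            (p + 1 ≤ q ∧ q ≤ p + m ∧ q ≤ n ∧ okStep n a q)
        · rw [(char1 q h1).1 hcnd] at hgv
          rcases someMin_cases hgv with hv | hv
          · subst hv
            exact ReachS.step hreachp ⟨hplt, Or.inl ⟨hcnd.1, rfl, hcnd.2.1, hcnd.2.2.1,
              hcnd.2.2.2.1, hcnd.2.2.2.2⟩⟩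
          · exact inv.sound q v h1 h2 hv
        · rw [(char1 q h1).2 hcnd] at hgv
          exact inv.sound q v h1 h2 hgv
      have sound2 : ∀ q v, -1 ≤ q → q ≤ n →
          getB' (swimB n k a p sv (jumpB n m a p sv best)) q = some v →
          ReachS n m k a (q, v) := by
        intro q v h1 h2 hgv
        by_cases hsw : sv < k ∧ q = p + 1 ∧ okStep n a (p + 1)
        · rw [(char2 q h1).1 hsw] at hgv
          rcases someMin_cases hgv with hv | hv
          · subst hv
            exact ReachS.step hreachp ⟨hplt, Or.inr ⟨hsw.1, hsw.2.1 ▸ rfl, rfl,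
              hsw.2.1 ▸ hsw.2.2⟩⟩
          · exact sound1 q v h1 h2 hv
        · rw [(char2 q h1).2 (by tauto)] at hgv
          exact sound1 q v h1 h2 hgv
      -- monotonicity of the two passes
      have mono01 : ∀ r v, -1 ≤ r → getB' best r = some v →
          ∃ v' ≤ v, getB' (jumpB n m a p sv best) r = some v' := by
        intro r v h1 hgv
        by_cases hcnd : (p = -1 ∨ PySem.Str.pyGet? a p = some 'L') ∧
            (p + 1 ≤ r ∧ r ≤ p + m ∧ r ≤ n ∧ okStep n a r)
        · obtain ⟨u, hu, _, hw⟩ := someMin_spec (getB' best r) sv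
          exact ⟨u, hw v hgv, by rw [(char1 r h1).1 hcnd]; exact hu⟩
        · exact ⟨v, le_refl _, by rw [(char1 r h1).2 hcnd]; exact hgv⟩
      have mono12 : ∀ r v, -1 ≤ r → getB' (jumpB n m a p sv best) r = some v →
          ∃ v' ≤ v, getB' (swimB n k a p sv (jumpB n m a p sv best)) r = some v' := by
        intro r v h1 hgv
        by_cases hsw : sv < k ∧ r = p + 1 ∧ okStep n a (p + 1)
        · obtain ⟨u, hu, _, hw⟩ := someMin_spec (getB' (jumpB n m a p sv best) r) (sv + 1)
          exact ⟨u, hw v hgv, by rw [(char2 r h1).1 hsw]; exact hu⟩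
        · exact ⟨v, le_refl _, by rw [(char2 r h1).2 (by tauto)]; exact hgv⟩
      -- the table entry of p itself is untouched by both passes
      have hguard : getB' (swimB n k a p sv (jumpB n m a p sv best)) p = some sv := by
        rw [(char2 p hp).2 (Or.inr (by omega)), (char1 p hp).2 (fun h => by omega)]
        exact hso
      -- completeness after both passes
      have compl2 : ∀ d, ReachB n m k a (p + 1) d →
          ∃ v ≤ d.2, getB' (swimB n k a p sv (jumpB n m a p sv best)) d.1 = some v := by
        intro d hd
        induction hd with
        | start => exact ⟨0, le_refl _, getB'_neg_one _⟩
        | @step c d hc hlt hs ih =>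
          have hrange := stepR_incr hs
          by_cases hcp : c.1 = p
          · obtain ⟨vc, hvc, hgc⟩ := ih
            rw [hcp, hguard] at hgc
            have hsvc : sv ≤ c.2 := by
              have := Option.some_inj.mp hgc
              omega
            obtain ⟨hcn, hj | hj⟩ := hs
            · -- jump from (p, ·)
              obtain ⟨hbr, hd2, h1, h2, h3, hok⟩ := hj
              have hd1 : -1 ≤ d.1 := by omega
              have hb1 : getB' (jumpB n m a p sv best) d.1 = someMin (getB' best d.1) sv :=
                (char1 d.1 hd1).1 ⟨hcp ▸ hbr, by omega, by omega, h3, hok⟩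
              obtain ⟨u, hu, huv, -⟩ := someMin_spec (getB' best d.1) sv
              obtain ⟨v', hv', hg'⟩ := mono12 d.1 u hd1 (by rw [hb1]; exact hu)
              exact ⟨v', by omega, hg'⟩
            · -- swim from (p, ·)
              obtain ⟨hk, hd1e, hd2, hok⟩ := hj
              have hd1 : -1 ≤ d.1 := by omega
              have hb2 : getB' (swimB n k a p sv (jumpB n m a p sv best)) d.1 =
                  someMin (getB' (jumpB n m a p sv best) d.1) (sv + 1) :=
                (char2 d.1 hd1).1 ⟨by omega, by omega, by rw [← hcp]; exact hd1e ▸ hok⟩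
              obtain ⟨u, hu, huv, -⟩ := someMin_spec (getB' (jumpB n m a p sv best) d.1) (sv + 1)
              exact ⟨u, by omega, by rw [hb2]; exact hu⟩
          · have hd' : ReachB n m k a p d :=
              ReachB.step (reachB_shrink hc (by omega) (by omega)) (by omega) hs
            obtain ⟨v, hv, hg⟩ := inv.complete d hd'
            have hd1 : -1 ≤ d.1 := by
              have := (reachS_range h0 (reachB_reachS hd')).1
              omega
            obtain ⟨v1, hv1, hg1⟩ := mono01 d.1 v hd1 hg
            obtain ⟨v2, hv2, hg2⟩ := mono12 d.1 v1 hd1 hg1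
            exact ⟨v2, by omega, hg2⟩
      exact bloopP_inv n m k a h0 hlen (p + 1) _ (by omega) (by omega)
        ⟨by rw [show (swimB n k a p sv (jumpB n m a p sv best)).length =
                  (jumpB n m a p sv best).length from ?_, hlen1, inv.len]
            unfold swimB
            split
            · split
              · exact relaxB_len _ _ _
              · split
                · rfl
                · split
                  · exact relaxB_len _ _ _
                  · rfl
            · rfl,
          sound2, compl2⟩
  · rename_i hplt
    have hpe : p = n := by omega
    subst hpe
    exact inv
termination_by p best => (n - p).toNat
decreasing_by all_goals omega

lemma solveB_yes (n m k : Int) (a : String) (h0 : 0 ≤ n) (hlen : n ≤ (a.toList.length : Int)) :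
    (solve_alt n m k a = "YES" ↔ ∃ s, ReachS n m k a (n, s)) := by
  have inv0 : InvB n m k a (-1) (List.replicate (n + 1).toNat none) := by
    refine ⟨by simp, ?_, ?_⟩
    · intro q v hq1 hq2 hg
      by_cases hq : q = -1
      · subst hq
        rw [getB'_neg_one] at hg
        have hv : v = 0 := (Option.some_inj.mp hg).symm
        subst hv
        exact ReachS.start
      · exfalso
        unfold getB' at hg
        rw [if_neg hq, List.getD_eq_getElem?_getD, List.getElem?_replicate] at hg
        by_cases hlt : q.toNat < (n + 1).toNat <;> simp [hlt] at hg
    · intro d hd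
      cases hd with
      | start => exact ⟨0, le_refl _, getB'_neg_one _⟩
      | @step c d hc hlt hs =>
        exact absurd hlt (by have := (reachS_range h0 (reachB_reachS hc)).1; omega)
  have invn := bloopP_inv n m k a h0 hlen (-1) _ (le_refl _) (by omega) inv0
  have hlenR : (bloopP n m k a (-1) (List.replicate (n + 1).toNat none)).length = (n + 1).toNat :=
    invn.len
  have hn : PySem.List.pyGet? (bloopP n m k a (-1) (List.replicate (n + 1).toNat none)) n =
      some ((bloopP n m k a (-1) (List.replicate (n + 1).toNat none))[n.toNat]'(by omega)) :=
    PySem.List.pyGet?_eq_some_getElem _ h0 (by omega)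
  have hgR : getB' (bloopP n m k a (-1) (List.replicate (n + 1).toNat none)) n =
      (bloopP n m k a (-1) (List.replicate (n + 1).toNat none))[n.toNat]'(by omega) := by
    unfold getB'
    rw [if_neg (by omega), List.getD_eq_getElem?_getD, List.getElem?_eq_getElem (by omega)]
    rfl
  have hkey : PySem.List.pyGet? (bloopP n m k a (-1) (List.replicate (n + 1).toNat none)) n =
      some (getB' (bloopP n m k a (-1) (List.replicate (n + 1).toNat none)) n) := by
    rw [hgR]; exact hn
  unfold solve_alt
  rw [hkey]
  rcases hgv : getB' (bloopP n m k a (-1) (List.replicate (n + 1).toNat none)) n with _ | v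
  · simp only []
    constructor
    · intro h
      exact absurd h (by decide)
    · rintro ⟨sw, hsw⟩
      obtain ⟨v, hv, hg⟩ := invn.complete (n, sw) (reachS_reachB hsw (le_refl _))
      rw [hgv] at hg
      cases hg
  · simp only []
    constructor
    · intro _
      exact ⟨v, invn.sound n v (by omega) (le_refl _) hgv⟩
    · intro _
      trivial

lemma solveA_trivial (n m k : Int) (a : String) (hn : 0 < n) (hm : m < 1) (hk : k < 1) :
    solve n m k a = "NO" := by
  unfold solve
  have h2 : (n.toNat + 2) * (k.toNat + 1) * (m.toNat + 2) + 2 =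
      ((n.toNat + 2) * (k.toNat + 1) * (m.toNat + 2) + 1) + 1 := rfl
  have hempty : (PySem.Set.empty : PySem.Set (Int × Int)) = [] := rfl
  rw [h2, hempty, loopA, if_neg (by omega), if_neg (List.not_mem_nil)]
  have hj : jumpA n m a (-1, 0) (PySem.Set.add [] (-1, 0)) [] = [] := by
    unfold jumpA
    rw [if_pos (Or.inl rfl), jloopA, dif_neg (by omega)]
  have hs : swimA n k a (-1, 0) (PySem.Set.add [] (-1, 0)) [] = [] := by
    unfold swimA
    rw [if_neg (by omega)]
  rw [hj, hs, loopA]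

lemma bloopP_triv (n m k : Int) (a : String) (hm : m < 1) (hk : k < 1) :
    ∀ p, bloopP n m k a p (List.replicate (n + 1).toNat none) =
      List.replicate (n + 1).toNat none := by
  intro p
  rw [bloopP]
  split
  · rename_i hplt
    by_cases hp1 : p = -1
    · subst hp1
      rw [show readP (List.replicate (n + 1).toNat none) (-1) = some 0 from by
        unfold readP; rw [if_pos rfl]]
      simp only []
      have hjb : jumpB n m a (-1) 0 (List.replicate (n + 1).toNat none) =
          List.replicate (n + 1).toNat none := by
        unfold jumpB
        rw [if_pos (Or.inl rfl), bloopJ, dif_neg (by omega)]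
      have hsb : swimB n k a (-1) 0 (List.replicate (n + 1).toNat none) =
          List.replicate (n + 1).toNat none := by
        unfold swimB
        rw [if_neg (by omega)]
      rw [hjb, hsb]
      exact bloopP_triv n m k a hm hk 0
    · rw [show readP (List.replicate (n + 1).toNat none) p = none from by
        unfold readP
        rw [if_neg hp1]
        rcases hg : PySem.List.pyGet? (List.replicate (n + 1).toNat none) p with _ | ov
        · rfl
        · have : ov = none :=
            List.eq_of_mem_replicate (PySem.List.mem_of_pyGet?_eq_some _ hg)
          rw [this]]
      simp only []
      exact bloopP_triv n m k a hm hk (p + 1)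
  · rfl
termination_by p => (n - p).toNat
decreasing_by all_goals omega

lemma solveB_trivial (n m k : Int) (a : String) (hn : 0 < n) (hm : m < 1) (hk : k < 1) :
    solve_alt n m k a = "NO" := by
  unfold solve_alt
  rw [bloopP_triv n m k a hm hk (-1)]
  have : PySem.List.pyGet? (List.replicate (n + 1).toNat (none : Option Int)) n =
      some ((List.replicate (n + 1).toNat (none : Option Int))[n.toNat]'(by simp; omega)) :=
    PySem.List.pyGet?_eq_some_getElem _ (by omega) (by simp)
  rw [this]
  simp

lemma solveB_cases (n m k : Int) (a : String) :
    solve_alt n m k a = "YES" ∨ solve_alt n m k a = "NO" := by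
  unfold solve_alt
  rcases h : PySem.List.pyGet? (bloopP n m k a (-1) (List.replicate (n + 1).toNat none)) n with _ | o
  · right; simp [h]
  · rcases o with _ | v
    · right; simp [h]
    · left; simp [h]

-- ===== VERDICT (by name: the statement is the Claim_ definition above) =====
theorem solve_spec : Claim_equal_solve := by
  intro n m k a _hdom hpre
  obtain ⟨h0, hrest⟩ := hpre
  unfold Spec_solve
  by_cases hlen : n ≤ (a.toList.length : Int)
  · have hA := solveA_yes n m k a h0 hlen
    have hB := solveB_yes n m k a h0 hlen
    rcases solveB_cases n m k a with hb | hb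
    · rw [hb]; exact hA.mpr (hB.mp hb)
    · rw [hb]
      rcases loopA_cases n m k a ((n.toNat + 2) * (k.toNat + 1) * (m.toNat + 2) + 2) [(-1, 0)]
        PySem.Set.empty with ha | ha
      · exact absurd (hB.mpr (hA.mp ha)) (by rw [hb]; decide)
      · exact ha
  · have hn : 0 < n := by
      have : (0 : Int) ≤ (a.toList.length : Int) := by positivity
      omega
    rcases hrest with h | ⟨hm, hk⟩
    · exact absurd h hlen
    · rw [solveA_trivial n m k a hn hm hk, solveB_trivial n m k a hn hm hk]
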